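-- pv_equiv track=rewrite | github.com/GNU-connect/studentID_OCR | src/notice/notice.py | _group_notice_by_category
-- ===== SOURCE A (Python) =====
-- def _group_notice_by_category(notice_list):
--     # 빈 딕셔너리를 생성합니다.
--     categories = {}
--
--     # 각 항목을 category_id를 기준으로 딕셔너리에 추가합니다.
--     for notice in notice_list:
--         category_id = notice['category_id']
--         if category_id not in categories:
--             categories[category_id] = []
--         categories[category_id].append(notice)
--
--     return categories
-- ===== SOURCE B (Python) =====
-- def _group_notice_by_category(notice_list):
--     # Distinct category_ids in first-appearance order, then one filter pass per id.
--     ids = list(dict.fromkeys(n['category_id'] for n in notice_list))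
--     return {cid: [n for n in notice_list if n['category_id'] == cid] for cid in ids}
-- ===== Notes on version B (the rewrite author's own statement) =====
-- stated objective: alternative
-- what changed: Replaces the single dict-accumulating pass (create-bucket-then-append per element) with an index-keys-then-filter decomposition: collect the distinct category_ids in first-appearance order, then build each group by one filter comprehension over the list.
import Mathlib
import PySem

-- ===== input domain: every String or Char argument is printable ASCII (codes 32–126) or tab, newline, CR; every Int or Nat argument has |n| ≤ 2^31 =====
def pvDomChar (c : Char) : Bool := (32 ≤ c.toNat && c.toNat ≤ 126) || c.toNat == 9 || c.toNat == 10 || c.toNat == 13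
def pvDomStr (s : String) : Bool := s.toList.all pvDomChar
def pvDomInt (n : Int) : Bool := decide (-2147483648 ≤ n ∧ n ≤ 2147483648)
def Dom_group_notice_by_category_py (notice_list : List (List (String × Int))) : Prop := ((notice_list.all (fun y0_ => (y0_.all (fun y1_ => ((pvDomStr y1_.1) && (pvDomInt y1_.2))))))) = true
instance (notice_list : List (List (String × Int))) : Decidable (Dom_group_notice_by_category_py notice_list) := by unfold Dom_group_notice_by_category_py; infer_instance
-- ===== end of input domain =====

-- B groups by distinct-ids-then-filter instead of A's dict-accumulating pass; same result, alternative decomposition.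

-- notice['category_id']: first-match lookup; total form, exact under Pre_ (key present)
def pvCategoryId (notice : List (String × Int)) : Int :=
  (PySem.Dict.mk notice).getD "category_id" 0

-- ===== PORT A =====
def group_notice_by_category_py (notice_list : List (List (String × Int))) : List (Int × List (List (String × Int))) :=
  (notice_list.foldl
    (fun categories notice =>
      let category_id := pvCategoryId notice
      let categories :=
        if categories.contains category_id then categories
        else categories.insert category_id []
      categories.modify category_id [] (fun l => l ++ [notice]))
    PySem.Dict.empty).items

-- ===== PORT B =====
def group_notice_by_category_py_alt (notice_list : List (List (String × Int))) : List (Int × List (List (String × Int))) :=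
  let ids : PySem.Set Int := PySem.Set.ofList (notice_list.map pvCategoryId)
  ids.map (fun cid => (cid, notice_list.filter (fun n => pvCategoryId n == cid)))

-- ===== PRECONDITION & SPEC =====
-- Pre_ excludes notices with no 'category_id' key, on which A (and B) raise KeyError.
def Pre_group_notice_by_category_py (notice_list : List (List (String × Int))) : Prop :=
  (notice_list.all (fun n => n.any (fun p => p.1 == "category_id"))) = true
instance (notice_list : List (List (String × Int))) : Decidable (Pre_group_notice_by_category_py notice_list) := by unfold Pre_group_notice_by_category_py; infer_instance

def pvWitness_group_notice_by_category_py : (List (List (String × Int))) :=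
  [[("category_id", 1), ("id", 10)], [("category_id", 2)], [("category_id", 1), ("id", 11)]]

def Spec_group_notice_by_category_py (notice_list : List (List (String × Int))) (out : List (Int × List (List (String × Int)))) : Prop := out = group_notice_by_category_py_alt notice_list
instance (notice_list : List (List (String × Int))) (out : List (Int × List (List (String × Int)))) : Decidable (Spec_group_notice_by_category_py notice_list out) := by unfold Spec_group_notice_by_category_py; infer_instance

-- ===== CLAIM (what is proved, stated in full; the proofs are below) =====
def Claim_equal_group_notice_by_category_py : Prop := ∀ (notice_list : List (List (String × Int))), Dom_group_notice_by_category_py notice_list → Pre_group_notice_by_category_py notice_list → Spec_group_notice_by_category_py notice_list (group_notice_by_category_py notice_list)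

-- ===== LEMMAS AND PROOFS =====

-- A's "create empty bucket if missing, then append" step is Dict.modify with default [].
theorem pv_stepA_eq_modify (d : PySem.Dict Int (List (List (String × Int)))) (k : Int)
    (n : List (String × Int)) :
    (if d.contains k then d else d.insert k []).modify k [] (fun l => l ++ [n])
      = d.modify k [] (fun l => l ++ [n]) := by
  by_cases h : d.contains k
  · simp [h]
  · have hany : (d.items.any fun p => p.1 == k) = false := by
      rw [Bool.eq_false_iff]
      intro hc
      exact h (by simpa [PySem.Dict.contains] using hc)
    have hmem : ∀ p ∈ d.items, ¬ (p.1 = k) := by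
      intro p hp
      have := List.any_eq_false.mp hany p hp
      simpa using this
    simp only [h]
    apply PySem.Dict.ext
    simp [PySem.Dict.modify, PySem.Dict.insert, PySem.Dict.contains, PySem.Dict.getD,
      PySem.Dict.get?, hany]
    have hfind : List.find? (fun p => p.1 == k) d.items = none := by
      rw [List.find?_eq_none]
      intro p hp; simpa using hmem p hp
    constructor
    · apply List.map_congr_left ?_ |>.trans (List.map_id _)
      intro p hp
      simp [hmem p hp]
    · simp [hfind]

theorem pv_fold_eq (notice_list : List (List (String × Int))) :
    (notice_list.foldl
      (fun categories notice =>
        let category_id := pvCategoryId notice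
        let categories :=
          if categories.contains category_id then categories
          else categories.insert category_id []
        categories.modify category_id [] (fun l => l ++ [notice]))
      PySem.Dict.empty)
    = (notice_list.map (fun n => (pvCategoryId n, n))).foldl
        (fun d p => d.modify p.1 [] (fun l => l ++ [p.2])) PySem.Dict.empty := by
  rw [List.foldl_map]
  apply PySem.List.foldl_congr_mem
  intro acc x _
  simpa using pv_stepA_eq_modify acc (pvCategoryId x) x

theorem group_notice_by_category_py_spec : Claim_equal_group_notice_by_category_py := by
  intro notice_list _ _
  unfold Spec_group_notice_by_category_py
  unfold group_notice_by_category_py group_notice_by_category_py_alt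
  rw [pv_fold_eq]
  set l := notice_list.map (fun n => (pvCategoryId n, n)) with hl
  have hnd : ((l.foldl (fun d p => d.modify p.1 [] (fun v => v ++ [p.2])) PySem.Dict.empty)).keys.Nodup := by
    exact PySem.Dict.nodup_keys_foldl_modify_key l Prod.fst [] _ _ PySem.Dict.nodup_keys_empty
  rw [PySem.Dict.items_eq_map_keys _ hnd ([] : List (List (String × Int)))]
  rw [PySem.Dict.keys_foldl_modify_key]
  simp only [PySem.Dict.keys_empty, PySem.Set.update_nil_left]
  have hkeys : l.map Prod.fst = notice_list.map pvCategoryId := by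
    rw [hl, List.map_map]; rfl
  rw [hkeys]
  apply List.map_congr_left
  intro k _
  rw [PySem.Dict.getD_foldl_modify_append]
  simp [hl, List.filter_map, List.map_map, Function.comp_def]
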